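-- pv_equiv track=rewrite | github.com/exe1023/FusionNet | data.py | count_vocab
-- ===== SOURCE A (Python) =====
-- from collections import Counter
--
-- def count_vocab(examples):
--     vocab_count = Counter()
--     max_context, max_q = 0, 0
--     for example in examples:
--         context = example['context']
--         q = example['q']
--         vocab_count.update(context)
--         vocab_count.update(q)
--
--         max_context = max(max_context, len(context))
--         max_q = max(max_q, len(q))
--
--     return vocab_count, (max_context, max_q)
-- ===== SOURCE B (Python) =====
-- from collections import Counter
--
-- def count_vocab(examples):
--     examples = list(examples)  # materialize: keeps one-shot iterators equivalent
--
--     def solve(chunk):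
--         # divide and conquer: count each half, merge the sub-counters
--         if not chunk:
--             return Counter(), 0, 0
--         if len(chunk) == 1:
--             e = chunk[0]
--             return Counter(e['context'] + e['q']), len(e['context']), len(e['q'])
--         mid = len(chunk) // 2
--         c1, mc1, mq1 = solve(chunk[:mid])
--         c2, mc2, mq2 = solve(chunk[mid:])
--         c1.update(c2)
--         return c1, max(mc1, mc2), max(mq1, mq2)
--
--     c, mc, mq = solve(examples)
--     return c, (mc, mq)
-- ===== Notes on version B (the rewrite author's own statement) =====
-- stated objective: alternative
-- what changed: A's single fused accumulating loop is replaced by binary divide-and-conquer: the example list is split in half, each half is solved recursively, and the resulting sub-Counters are merged (c1.update(c2)) while the maxima are combined with max.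
import Mathlib
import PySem

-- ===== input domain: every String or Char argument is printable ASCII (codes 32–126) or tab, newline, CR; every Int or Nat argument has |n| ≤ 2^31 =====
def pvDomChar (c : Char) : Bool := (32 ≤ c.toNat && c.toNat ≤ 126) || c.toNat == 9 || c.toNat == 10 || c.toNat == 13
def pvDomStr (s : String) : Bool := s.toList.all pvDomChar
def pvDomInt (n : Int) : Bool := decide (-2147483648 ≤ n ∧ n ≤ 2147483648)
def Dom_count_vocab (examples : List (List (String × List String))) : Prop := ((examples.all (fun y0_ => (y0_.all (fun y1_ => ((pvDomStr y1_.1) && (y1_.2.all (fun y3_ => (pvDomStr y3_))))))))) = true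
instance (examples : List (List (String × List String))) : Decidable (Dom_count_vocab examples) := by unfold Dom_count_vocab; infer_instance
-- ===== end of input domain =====

-- B replaces A's single fused accumulating loop by binary divide-and-conquer: each half is
-- counted recursively and the sub-Counters are merged; objective: alternative. Return value only.

-- ===== PORT A =====
-- ex['context'] / ex['q'] raise KeyError when absent; Pre_ excludes that, so the
-- port reads them with getD [] (exact wherever Pre_ holds).
def count_vocab (examples : List (List (String × List String))) : (List (String × Int)) × (Int × Int) :=
  let st := examples.foldl
    (fun (s : PySem.Dict String Int × Int × Int) ex =>
      let context := (PySem.Dict.mk ex).getD "context" []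
      let q := (PySem.Dict.mk ex).getD "q" []
      let d := context.foldl (fun d t => d.modify t 0 (· + 1)) s.1
      let d := q.foldl (fun d t => d.modify t 0 (· + 1)) d
      (d, max s.2.1 (context.length : Int), max s.2.2 (q.length : Int)))
    (PySem.Dict.empty, 0, 0)
  (st.1.items, (st.2.1, st.2.2))

-- ===== PORT B =====
-- c1.update(c2) with c2 a Counter: add c2's count to c1 for each of c2's items.
def pvMergeCounters (d1 d2 : PySem.Dict String Int) : PySem.Dict String Int :=
  d2.items.foldl (fun d p => d.modify p.1 0 (· + p.2)) d1

-- combine step: 'c1.update(c2); return c1, max(mc1,mc2), max(mq1,mq2)'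
def pvCombine (r1 r2 : PySem.Dict String Int × Int × Int) :
    PySem.Dict String Int × Int × Int :=
  (pvMergeCounters r1.1 r2.1, max r1.2.1 r2.2.1, max r1.2.2 r2.2.2)

def pvSolve (chunk : List (List (String × List String))) : PySem.Dict String Int × Int × Int :=
  match chunk with
  | [] => (PySem.Dict.empty, 0, 0)
  | [e] =>
      let context := (PySem.Dict.mk e).getD "context" []
      let q := (PySem.Dict.mk e).getD "q" []
      (PySem.Dict.counter (context ++ q), (context.length : Int), (q.length : Int))
  | a :: b :: rest =>
      pvCombine (pvSolve ((a :: b :: rest).take ((a :: b :: rest).length / 2)))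
                (pvSolve ((a :: b :: rest).drop ((a :: b :: rest).length / 2)))
termination_by chunk.length
decreasing_by
  · simp [List.length_take]; omega
  · simp [List.length_drop]; omega

def count_vocab_alt (examples : List (List (String × List String))) : (List (String × Int)) × (Int × Int) :=
  let r := pvSolve examples
  (r.1.items, (r.2.1, r.2.2))

-- ===== PRECONDITION & SPEC =====
-- Pre_ excludes exactly the inputs on which A raises KeyError: every ex must carry
-- both the "context" and the "q" key.
def Pre_count_vocab (examples : List (List (String × List String))) : Prop :=
  (examples.all (fun e => e.any (fun p => p.1 == "context") && e.any (fun p => p.1 == "q"))) = true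
instance (examples : List (List (String × List String))) : Decidable (Pre_count_vocab examples) := by unfold Pre_count_vocab; infer_instance
def pvWitness_count_vocab : (List (List (String × List String))) :=
  [[("context", ["a", "b", "a"]), ("q", ["b"])], [("context", []), ("q", ["c", "a"])]]

def Spec_count_vocab (examples : List (List (String × List String))) (out : (List (String × Int)) × (Int × Int)) : Prop := out = count_vocab_alt examples
instance (examples : List (List (String × List String))) (out : (List (String × Int)) × (Int × Int)) : Decidable (Spec_count_vocab examples out) := by unfold Spec_count_vocab; infer_instance

-- ===== CLAIM (what is proved, stated in full; the proofs are below) =====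
def Claim_equal_count_vocab : Prop := ∀ (examples : List (List (String × List String))), Dom_count_vocab examples → Pre_count_vocab examples → Spec_count_vocab examples (count_vocab examples)

-- ===== LEMMAS AND PROOFS =====

/-- A's fused loop splits into a token fold and two running maxima. -/
lemma count_vocab_loop (examples : List (List (String × List String)))
    (d : PySem.Dict String Int) (mc mq : Int) :
    examples.foldl
      (fun (s : PySem.Dict String Int × Int × Int) ex =>
        let context := (PySem.Dict.mk ex).getD "context" []
        let q := (PySem.Dict.mk ex).getD "q" []
        let d := context.foldl (fun d t => d.modify t 0 (· + 1)) s.1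
        let d := q.foldl (fun d t => d.modify t 0 (· + 1)) d
        (d, max s.2.1 (context.length : Int), max s.2.2 (q.length : Int)))
      (d, mc, mq)
    = ((examples.flatMap (fun e =>
          (PySem.Dict.mk e).getD "context" [] ++ (PySem.Dict.mk e).getD "q" [])).foldl
            (fun d t => d.modify t 0 (· + 1)) d,
       (examples.map (fun e => ((((PySem.Dict.mk e).getD "context" ([] : List String)).length : Int)))).foldl max mc,
       (examples.map (fun e => ((((PySem.Dict.mk e).getD "q" ([] : List String)).length : Int)))).foldl max mq) := by
  induction examples generalizing d mc mq with
  | nil => rfl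
  | cons e t ih =>
      simp only [List.foldl_cons, List.flatMap_cons, List.map_cons, List.foldl_append, ih]

/-- Pull a nonnegative seed out of a left max-fold. -/
lemma foldl_max_of_nonneg (l : List Int) (m : Int) (hm : 0 ≤ m) :
    l.foldl max m = max m (l.foldl max 0) := by
  induction l generalizing m with
  | nil => simp [max_eq_left hm]
  | cons x t ih =>
      rw [List.foldl_cons, List.foldl_cons, ih (max m x) (le_trans hm (le_max_left _ _)),
        ih (max 0 x) (le_max_left _ _), ← max_assoc, ← max_assoc, max_eq_left hm]

/-- Folding `d[k] += v` over a pair list sums the values stored at each key. -/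
lemma getD_foldl_modify_pairs (l : List (String × Int)) (d : PySem.Dict String Int) (v : String) :
    (l.foldl (fun d p => d.modify p.1 0 (· + p.2)) d).getD v 0
    = d.getD v 0 + ((l.filter (fun p => p.1 == v)).map (·.2)).sum := by
  induction l generalizing d with
  | nil => simp
  | cons p t ih =>
      rw [List.foldl_cons, ih]
      by_cases h : p.1 = v
      · subst h
        simp [add_assoc]
      · have : (p.1 == v) = false := by simpa using h
        simp [PySem.Dict.getD_modify, Ne.symm h, this]

/-- On a duplicate-free key list, filtering for one key keeps at most that key. -/
lemma filter_eq_of_nodup (zs : List String) (hz : zs.Nodup) (v : String) :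
    zs.filter (fun k => k == v) = if v ∈ zs then [v] else [] := by
  induction zs with
  | nil => simp
  | cons a t ih =>
      rcases List.nodup_cons.mp hz with ⟨ha, ht⟩
      by_cases h : a = v
      · subst h
        have hnil : List.filter (fun k => k == a) t = [] :=
          List.filter_eq_nil_iff.mpr (fun k hk => by
            simp only [beq_iff_eq]
            rintro rfl; exact ha hk)
        simp [hnil]
      · have hne : (a == v) = false := by simpa using h
        simp [hne, ih ht, Ne.symm h]

/-- Counter.update with another Counter equals counting the underlying tokens one by one. -/
lemma merge_counter (d : PySem.Dict String Int) (hd : d.keys.Nodup) (ys : List String) :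
    pvMergeCounters d (PySem.Dict.counter ys)
    = ys.foldl (fun d t => d.modify t 0 (· + 1)) d := by
  unfold pvMergeCounters
  have hndL : (((PySem.Dict.counter ys).items).foldl
      (fun d (p : String × Int) => d.modify p.1 0 (· + p.2)) d).keys.Nodup :=
    PySem.Dict.nodup_keys_foldl_modify_key _ Prod.fst 0 _ d hd
  have hndR : (ys.foldl (fun d t => d.modify t 0 (· + 1)) d).keys.Nodup :=
    PySem.Dict.nodup_keys_foldl_modify_key ys (fun t => t) 0 (fun _ _ => (· + 1)) d hd
  have hkeys : (((PySem.Dict.counter ys).items).foldl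
      (fun d (p : String × Int) => d.modify p.1 0 (· + p.2)) d).keys
      = (ys.foldl (fun d t => d.modify t 0 (· + 1)) d).keys := by
    rw [PySem.Dict.keys_foldl_modify_key _ Prod.fst 0 _ d,
      PySem.Dict.keys_foldl_modify_key ys (fun t => t) 0 (fun _ _ => (· + 1)) d]
    have hmap : ((PySem.Dict.counter ys).items).map Prod.fst = PySem.Set.ofList ys := by
      rw [PySem.Dict.items_counter, List.map_map]
      exact List.map_id' _
    rw [hmap, List.map_id', PySem.Set.update_eq_append_filter,
      PySem.Set.update_eq_append_filter, PySem.Set.ofList_ofList]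
  have hget : ∀ v, (((PySem.Dict.counter ys).items).foldl
      (fun d (p : String × Int) => d.modify p.1 0 (· + p.2)) d).getD v 0
      = (ys.foldl (fun d t => d.modify t 0 (· + 1)) d).getD v 0 := by
    intro v
    rw [getD_foldl_modify_pairs, PySem.Dict.getD_foldl_modify_add_one,
      PySem.Dict.items_counter]
    have : ((PySem.Set.ofList ys).map (fun k => (k, (ys.count k : Int)))).filter
        (fun p => p.1 == v)
        = ((PySem.Set.ofList ys).filter (fun k => k == v)).map
            (fun k => (k, (ys.count k : Int))) := by
      rw [List.filter_map]; rfl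
    rw [this, filter_eq_of_nodup _ (PySem.Set.nodup_ofList ys) v]
    by_cases hv : v ∈ ys
    · simp [PySem.Set.mem_ofList, hv]
    · simp [PySem.Set.mem_ofList, hv, List.count_eq_zero_of_not_mem hv]
  show (((PySem.Dict.counter ys).items).foldl
      (fun d (p : String × Int) => d.modify p.1 0 (· + p.2)) d)
      = ys.foldl (fun d t => d.modify t 0 (· + 1)) d
  apply PySem.Dict.ext
  rw [PySem.Dict.items_eq_map_keys _ hndL (0 : Int),
    PySem.Dict.items_eq_map_keys _ hndR (0 : Int), hkeys]
  exact List.map_congr_left (fun k _ => by rw [hget k])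

/-- The divide-and-conquer solver computes the token counter and the two maxima. -/
lemma pvSolve_eq (l : List (List (String × List String))) :
    pvSolve l
    = (PySem.Dict.counter (l.flatMap (fun e =>
          (PySem.Dict.mk e).getD "context" [] ++ (PySem.Dict.mk e).getD "q" [])),
       (l.map (fun e => ((((PySem.Dict.mk e).getD "context" ([] : List String)).length : Int)))).foldl max 0,
       (l.map (fun e => ((((PySem.Dict.mk e).getD "q" ([] : List String)).length : Int)))).foldl max 0) := by
  fun_induction pvSolve l with
  | case1 => rfl
  | case2 e =>
      simp only [List.flatMap_cons, List.flatMap_nil, List.append_nil, List.map_cons,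
        List.map_nil, List.foldl_cons, List.foldl_nil]
      rw [max_eq_right (Int.natCast_nonneg _), max_eq_right (Int.natCast_nonneg _)]
  | case3 a b rest ihtake ihdrop =>
      rw [ihtake, ihdrop, pvCombine]
      have hsplit := List.take_append_drop ((a :: b :: rest).length / 2) (a :: b :: rest)
      have hmap : ∀ f : List (String × List String) → Int,
          (a :: b :: rest).map f
          = ((a :: b :: rest).take ((a :: b :: rest).length / 2)).map f
            ++ ((a :: b :: rest).drop ((a :: b :: rest).length / 2)).map f := by
        intro f; rw [← List.map_append, hsplit]
      have hflat : ∀ f : List (String × List String) → List String,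
          (a :: b :: rest).flatMap f
          = ((a :: b :: rest).take ((a :: b :: rest).length / 2)).flatMap f
            ++ ((a :: b :: rest).drop ((a :: b :: rest).length / 2)).flatMap f := by
        intro f; rw [← List.flatMap_append, hsplit]
      refine Prod.ext ?_ (Prod.ext ?_ ?_) <;> dsimp only
      · rw [merge_counter _ (PySem.Dict.nodup_keys_counter _) _,
          PySem.Dict.counter_eq_foldl, PySem.Dict.counter_eq_foldl, ← List.foldl_append,
          hflat]
      · rw [hmap, List.foldl_append,
          foldl_max_of_nonneg _ _ (PySem.List.le_foldl_max _ 0).1]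
      · rw [hmap, List.foldl_append,
          foldl_max_of_nonneg _ _ (PySem.List.le_foldl_max _ 0).1]

-- ===== VERDICT (by name: the statement is the Claim_ definition above) =====
theorem count_vocab_spec : Claim_equal_count_vocab := by
  intro examples _ _
  show count_vocab examples = count_vocab_alt examples
  simp only [count_vocab, count_vocab_alt, count_vocab_loop, pvSolve_eq,
    PySem.Dict.counter_eq_foldl]
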